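-- pv_equiv track=rewrite | github.com/ngiengkianyew/daily-coding-problem | solutions/problem_144.py | get_mapping_indices
-- ===== SOURCE A (Python) =====
-- def get_mapping_indices(arr):
--     nl_indices = dict()
--     sorted_tuples = [(x, i) for i, x in enumerate(arr)]
--     sorted_tuples.sort(key=lambda x: x[0])
--
--     for k, (_, i) in enumerate(sorted_tuples[:-1]):
--         min_dist = len(arr)
--         for m in range(k + 1, len(sorted_tuples)):
--             dist = abs(i - sorted_tuples[m][1])
--             if dist < min_dist:
--                 min_dist = dist
--                 nl_indices[i] = sorted_tuples[m][1]
--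
--     return nl_indices
-- ===== SOURCE B (Python) =====
-- def get_mapping_indices(arr):
--     # Sweep the sort order from highest to lowest, keeping the original indices of
--     # the already-seen (later-sorted) elements in an index-sorted list; the nearest
--     # original index is one of the two bisection neighbours, ties broken by sorted
--     # position (= A's scan order).
--     n = len(arr)
--     order = sorted(range(n), key=lambda i: arr[i])
--     pos = {}
--     for p, i in enumerate(order):
--         pos[i] = p
--     suffix = []   # original indices of order[p+1:], kept sorted ascending
--     res = {}
--     for p in range(n - 1, -1, -1):
--         i = order[p]
--         if suffix:
--             lo, hi = 0, len(suffix)   # hand-written bisect_left (module uses no imports)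
--             while lo < hi:
--                 mid = (lo + hi) // 2
--                 if suffix[mid] < i:
--                     lo = mid + 1
--                 else:
--                     hi = mid
--             if lo == len(suffix):
--                 best = suffix[lo - 1]
--             elif lo == 0:
--                 best = suffix[0]
--             else:
--                 j, r = suffix[lo - 1], suffix[lo]
--                 best = j if (i - j, pos[j]) < (r - i, pos[r]) else r
--             suffix.insert(lo, i)
--             res[i] = best
--         else:
--             suffix.append(i)
--     return {i: res[i] for i in order[:-1]}
-- ===== Notes on version B (the rewrite author's own statement) =====
-- stated objective: faster
-- what changed: Instead of, for every element, rescanning all later-sorted elements for the nearest original index, B sweeps the sort order from highest to lowest while maintaining the already-seen original indices in a sorted list, so each query is a binary search plus a comparison of the two neighbouring indices (ties broken by sorted position, matching A's scan order).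
import Mathlib
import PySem

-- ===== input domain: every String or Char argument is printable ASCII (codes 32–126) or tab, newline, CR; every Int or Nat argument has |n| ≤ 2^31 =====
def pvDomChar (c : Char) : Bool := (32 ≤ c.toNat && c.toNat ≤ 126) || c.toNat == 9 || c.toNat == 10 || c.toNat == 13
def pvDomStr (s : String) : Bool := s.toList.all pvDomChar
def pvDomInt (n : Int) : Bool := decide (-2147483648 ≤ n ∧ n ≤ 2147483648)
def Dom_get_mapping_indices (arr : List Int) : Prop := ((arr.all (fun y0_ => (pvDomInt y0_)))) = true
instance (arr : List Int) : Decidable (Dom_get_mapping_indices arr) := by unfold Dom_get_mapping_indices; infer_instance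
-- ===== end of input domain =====

-- B replaces A's quadratic rescan of all later-sorted elements by a high-to-low sweep of the
-- sort order that keeps the seen original indices in a sorted list and binary-searches the two
-- neighbouring indices (ties broken by sorted position); proved to return exactly A's dict.
-- ===== PORT A =====
-- A: sort (value, index) pairs, then for every non-last sorted tuple scan all
-- later-sorted tuples, keeping the original index at each strict distance improvement.
def get_mapping_indices (arr : List Int) : List (Int × Int) :=
  let sorted_tuples : List (Int × Int) :=
    PySem.List.sorted ((PySem.List.enumerate arr).map (fun p => (p.2, p.1))) (fun t => t.1) false
  let nl : PySem.Dict Int Int :=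
    (PySem.List.enumerate (PySem.List.slice sorted_tuples none (some (-1)))).foldl
      (fun nl ki =>
        let k := ki.1
        let i := ki.2.2
        ((PySem.List.pyRange (k + 1) (sorted_tuples.length : Int) 1).foldl
          (fun (st : Int × PySem.Dict Int Int) m =>
            let dist := |i - (PySem.List.pyGetD sorted_tuples m (0, 0)).2|
            if dist < st.1 then (dist, st.2.insert i (PySem.List.pyGetD sorted_tuples m (0, 0)).2)
            else st)
          ((arr.length : Int), nl)).2)
      PySem.Dict.empty
  nl.items

-- ===== PORT B =====
-- hand-written bisect_left while-loop of Source B (lo, hi are Python ints)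
def pvBisect (suffix : List Int) (x lo hi : Int) : Int :=
  if h : lo < hi then
    let mid := PySem.Int.floordiv (lo + hi) 2
    if PySem.List.pyGetD suffix mid 0 < x then pvBisect suffix x (mid + 1) hi
    else pvBisect suffix x lo mid
  else lo
termination_by (hi - lo).toNat
decreasing_by
  all_goals
    have h1 := PySem.Int.floordiv_two_mid_bounds (lo := lo) (hi := hi) (le_of_lt h)
    have h2 : PySem.Int.floordiv (lo + hi) 2 < hi := by
      rw [PySem.Int.floordiv_lt_iff_lt_mul (by omega)]; omega
    omega

def get_mapping_indices_alt (arr : List Int) : List (Int × Int) :=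
  let n : Int := (arr.length : Int)
  let order := PySem.List.sorted (PySem.List.pyRange 0 n 1) (fun i => PySem.List.pyGetD arr i 0) false
  let pos : PySem.Dict Int Int :=
    (PySem.List.enumerate order).foldl (fun d pi => d.insert pi.2 pi.1) PySem.Dict.empty
  let st :=
    (PySem.List.pyRange (n - 1) (-1) (-1)).foldl
      (fun (st : List Int × PySem.Dict Int Int) p =>
        let suffix := st.1
        let res := st.2
        let i := PySem.List.pyGetD order p 0
        if suffix ≠ [] then
          let lo := pvBisect suffix i 0 (suffix.length : Int)
          let best :=
            if lo = (suffix.length : Int) then PySem.List.pyGetD suffix (lo - 1) 0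
            else if lo = 0 then PySem.List.pyGetD suffix 0 0
            else
              let j := PySem.List.pyGetD suffix (lo - 1) 0
              let r := PySem.List.pyGetD suffix lo 0
              -- Python tuple comparison (i-j, pos[j]) < (r-i, pos[r]), lexicographic;
              -- pos[·] looked up with getD: both keys are always present
              if i - j < r - i ∨ (i - j = r - i ∧ pos.getD j 0 < pos.getD r 0) then j else r
          (PySem.List.insert suffix lo i, res.insert i best)
        else (suffix ++ [i], res))
      ([], PySem.Dict.empty)
  let res := st.2
  -- {i: res[i] for i in order[:-1]}; res[i] looked up with getD: key always present
  ((PySem.List.slice order none (some (-1))).foldl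
      (fun d i => d.insert i (res.getD i 0)) PySem.Dict.empty).items

-- ===== PRECONDITION & SPEC =====
def Spec_get_mapping_indices (arr : List Int) (out : List (Int × Int)) : Prop := out = get_mapping_indices_alt arr
instance (arr : List Int) (out : List (Int × Int)) : Decidable (Spec_get_mapping_indices arr out) := by unfold Spec_get_mapping_indices; infer_instance

-- ===== CLAIM (what is proved, stated in full; the proofs are below) =====
def Claim_equal_get_mapping_indices : Prop := ∀ (arr : List Int), Dom_get_mapping_indices arr → Spec_get_mapping_indices arr (get_mapping_indices arr)

-- ===== LEMMAS AND PROOFS =====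

-- Proof-side names for the pieces both ports compute.
def pvKey (arr : List Int) : Int → Int := fun i => PySem.List.pyGetD arr i 0

def pvOrder (arr : List Int) : List Int :=
  PySem.List.sorted (PySem.List.pyRange 0 (arr.length : Int) 1) (pvKey arr) false

def pvGd (arr : List Int) (k : Int) : Int := PySem.List.pyGetD (pvOrder arr) k 0

def pvScan (i : Int) (l : List Int) (s : Int × Int) : Int × Int :=
  l.foldl (fun s j => if |i - j| < s.1 then (|i - j|, j) else s) s

def pvBestA (arr : List Int) (k : Nat) : Int :=
  (pvScan (pvGd arr (k : Int)) ((pvOrder arr).drop (k + 1)) ((arr.length : Int), 0)).2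

def pvAsc (l : List Int) : List Int := PySem.List.sorted l (fun x => x) false

def pvPos (arr : List Int) : PySem.Dict Int Int :=
  (PySem.List.enumerate (pvOrder arr)).foldl (fun d pi => d.insert pi.2 pi.1) PySem.Dict.empty

def pvChoose (i : Int) (s : List Int) (pos : PySem.Dict Int Int) : Int :=
  let lo := pvBisect s i 0 (s.length : Int)
  if lo = (s.length : Int) then PySem.List.pyGetD s (lo - 1) 0
  else if lo = 0 then PySem.List.pyGetD s 0 0
  else
    let j := PySem.List.pyGetD s (lo - 1) 0
    let r := PySem.List.pyGetD s lo 0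
    if i - j < r - i ∨ (i - j = r - i ∧ pos.getD j 0 < pos.getD r 0) then j else r

def pvBestB (arr : List Int) (k : Nat) : Int :=
  pvChoose (pvGd arr (k : Int)) (pvAsc ((pvOrder arr).drop (k + 1))) (pvPos arr)

-- the body of B's sweep, definitionally equal to the port's loop body
def pvBody (arr : List Int) (st : List Int × PySem.Dict Int Int) (p : Int) :
    List Int × PySem.Dict Int Int :=
  let suffix := st.1
  let res := st.2
  let i := PySem.List.pyGetD (pvOrder arr) p 0
  if suffix ≠ [] then
    (PySem.List.insert suffix (pvBisect suffix i 0 (suffix.length : Int)) i,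
     res.insert i (pvChoose i suffix (pvPos arr)))
  else (suffix ++ [i], res)

def pvLoop (arr : List Int) : List Int × PySem.Dict Int Int :=
  (PySem.List.pyRange ((arr.length : Int) - 1) (-1) (-1)).foldl (pvBody arr) ([], PySem.Dict.empty)

-- basic facts about the sorted order ----------------------------------------

lemma pvOrder_perm (arr : List Int) :
    (pvOrder arr).Perm (PySem.List.pyRange 0 (arr.length : Int) 1) := by
  exact PySem.List.sorted_perm _ _ _

lemma pvOrder_nodup (arr : List Int) : (pvOrder arr).Nodup := by
  exact ((pvOrder_perm arr).nodup_iff).2 (PySem.List.nodup_pyRange_one _ _)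

lemma pvOrder_length (arr : List Int) : (pvOrder arr).length = arr.length := by
  rw [pvOrder, PySem.List.length_sorted, PySem.List.length_pyRange_one]
  omega

lemma pvOrder_mem_bounds (arr : List Int) {x : Int} (hx : x ∈ pvOrder arr) :
    0 ≤ x ∧ x < (arr.length : Int) := by
  have := (pvOrder_perm arr).mem_iff.1 hx
  exact PySem.List.mem_pyRange_one.1 this

lemma pvGd_eq_getElem (arr : List Int) (k : Nat) (hk : k < arr.length) :
    pvGd arr (k : Int) = (pvOrder arr)[k]'(by rw [pvOrder_length]; exact hk) := by
  rw [pvGd, PySem.List.pyGetD_natCast, List.getD_eq_getElem]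

-- sorted commutes with an injective relabelling ------------------------------

lemma insertBy_map (f : Int → Int × Int) (b : Int × Int → Int × Int → Bool) (x : Int)
    (ys : List Int) :
    PySem.List.insertBy b (f x) (ys.map f)
      = (PySem.List.insertBy (fun a c => b (f a) (f c)) x ys).map f := by
  induction ys with
  | nil => simp [PySem.List.insertBy]
  | cons y ys ih =>
      simp only [List.map_cons, PySem.List.insertBy]
      split <;> simp_all

lemma sorted_map_fst (xs : List Int) (f : Int → Int × Int) (key : Int × Int → Int) :
    PySem.List.sorted (xs.map f) key false
      = (PySem.List.sorted xs (fun x => key (f x)) false).map f := by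
  rw [PySem.List.sorted_eq_foldl_insertBy, PySem.List.sorted_eq_foldl_insertBy]
  have h : ∀ (xs : List Int) (acc : List Int),
      (xs.map f).foldl (fun acc x => PySem.List.insertBy (fun a b => decide (key a < key b)) x acc)
        (acc.map f)
      = (xs.foldl (fun acc x =>
          PySem.List.insertBy (fun a b => decide (key (f a) < key (f b))) x acc) acc).map f := by
    intro xs
    induction xs with
    | nil => intro acc; simp
    | cons x xs ih =>
        intro acc
        simp only [List.map_cons, List.foldl_cons]
        rw [insertBy_map f (fun a b => decide (key a < key b)) x acc]
        exact ih _
  simpa using h xs []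

lemma sorted_tuples_eq (arr : List Int) :
    PySem.List.sorted ((PySem.List.enumerate arr).map (fun p => (p.2, p.1))) (fun t => t.1) false
      = (pvOrder arr).map (fun i => (pvKey arr i, i)) := by
  have he : (PySem.List.enumerate arr).map (fun p => (p.2, p.1))
      = (PySem.List.pyRange 0 (arr.length : Int) 1).map (fun i => (pvKey arr i, i)) := by
    rw [PySem.List.enumerate_eq_map_pyRange arr 0, List.map_map]
    simp [pvKey, Function.comp, PySem.List.len_eq]
  rw [he, sorted_map_fst]
  rfl

-- the strict-improvement scan -----------------------------------------------

lemma scanDictPair (i : Int) : ∀ (tl : List (Int × Int)) (md v : Int) (d : PySem.Dict Int Int),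
    tl.foldl (fun st t => if |i - t.2| < st.1 then (|i - t.2|, st.2.insert i t.2) else st)
        (md, d.insert i v)
      = ((pvScan i (tl.map (fun t => t.2)) (md, v)).1,
          d.insert i (pvScan i (tl.map (fun t => t.2)) (md, v)).2) := by
  intro tl
  induction tl with
  | nil => intro md v d; simp [pvScan]
  | cons t rest ih =>
      intro md v d
      simp only [List.foldl_cons, List.map_cons, pvScan]
      by_cases h : |i - t.2| < md
      · rw [if_pos h, if_pos h, PySem.Dict.insert_insert_self]
        exact ih |i - t.2| t.2 d
      · rw [if_neg h, if_neg h]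
        exact ih md v d

lemma scanDictStart (i : Int) (tl : List (Int × Int)) (md : Int) (d : PySem.Dict Int Int)
    (hne : tl ≠ []) (himp : ∀ t ∈ tl, |i - t.2| < md) :
    (tl.foldl (fun st t => if |i - t.2| < st.1 then (|i - t.2|, st.2.insert i t.2) else st)
        (md, d)).2
      = d.insert i (pvScan i (tl.map (fun t => t.2)) (md, 0)).2 := by
  rcases tl with _ | ⟨t, rest⟩
  · exact absurd rfl hne
  · have h := himp t (by simp)
    simp only [List.foldl_cons, List.map_cons, pvScan, List.foldl_cons, if_pos h]
    rw [show (|i - t.2|, d.insert i t.2)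
        = ((|i - t.2| : Int), d.insert i t.2) from rfl]
    rw [scanDictPair i rest |i - t.2| t.2 d]
    simp [pvScan]

lemma scan_spec (i : Int) : ∀ (l : List Int) (md v : Int),
    (pvScan i l (md, v)).1 ≤ md ∧ (∀ j ∈ l, (pvScan i l (md, v)).1 ≤ |i - j|) ∧
      (pvScan i l (md, v) = (md, v) ∨
        ((pvScan i l (md, v)).1 < md ∧
          ∃ pre suf, l = pre ++ (pvScan i l (md, v)).2 :: suf ∧
            |i - (pvScan i l (md, v)).2| = (pvScan i l (md, v)).1 ∧
            ∀ x ∈ pre, (pvScan i l (md, v)).1 < |i - x|)) := by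
  intro l
  induction l with
  | nil => intro md v; exact ⟨le_refl _, by simp, Or.inl rfl⟩
  | cons j rest ih =>
      intro md v
      by_cases h : |i - j| < md
      · have hs : pvScan i (j :: rest) (md, v) = pvScan i rest (|i - j|, j) := by
          simp [pvScan, h]
        rw [hs]
        obtain ⟨ih1, ih2, ih3⟩ := ih |i - j| j
        generalize hP : pvScan i rest (|i - j|, j) = P at ih1 ih2 ih3
        refine ⟨le_trans ih1 (le_of_lt h), ?_, ?_⟩
        · intro x hx
          rcases List.mem_cons.1 hx with rfl | hx
          · exact ih1
          · exact ih2 x hx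
        · rcases ih3 with heq | ⟨hlt, pre, suf, hsplit, habs, hpre⟩
          · refine Or.inr ?_
            rw [heq]
            exact ⟨h, [], rest, by simp, by simp, by simp⟩
          · refine Or.inr ⟨lt_trans hlt h, j :: pre, suf,
              by rw [List.cons_append, ← hsplit], habs, ?_⟩
            intro x hx
            rcases List.mem_cons.1 hx with rfl | hx
            · exact hlt
            · exact hpre x hx
      · have hs : pvScan i (j :: rest) (md, v) = pvScan i rest (md, v) := by
          simp [pvScan, h]
        rw [hs]
        obtain ⟨ih1, ih2, ih3⟩ := ih md v
        generalize hP : pvScan i rest (md, v) = P at ih1 ih2 ih3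
        refine ⟨ih1, ?_, ?_⟩
        · intro x hx
          rcases List.mem_cons.1 hx with rfl | hx
          · exact le_trans ih1 (not_lt.1 h)
          · exact ih2 x hx
        · rcases ih3 with heq | ⟨hlt, pre, suf, hsplit, habs, hpre⟩
          · exact Or.inl heq
          · refine Or.inr ⟨hlt, j :: pre, suf,
              by rw [List.cons_append, ← hsplit], habs, ?_⟩
            intro x hx
            rcases List.mem_cons.1 hx with rfl | hx
            · exact lt_of_lt_of_le hlt (not_lt.1 h)
            · exact hpre x hx

lemma firstmin_unique (f : Int → Int) (l : List Int) {c1 c2 : Int}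
    {pre1 suf1 pre2 suf2 : List Int}
    (h1 : l = pre1 ++ c1 :: suf1) (h1s : ∀ x ∈ pre1, f c1 < f x) (h1a : ∀ x ∈ l, f c1 ≤ f x)
    (h2 : l = pre2 ++ c2 :: suf2) (h2s : ∀ x ∈ pre2, f c2 < f x) (h2a : ∀ x ∈ l, f c2 ≤ f x) :
    c1 = c2 := by
  have key : ∀ (p1 : List Int) (a1 : Int) (s1 : List Int) (p2 : List Int) (a2 : Int)
      (s2 : List Int), l = p1 ++ a1 :: s1 → l = p2 ++ a2 :: s2 →
      (∀ x ∈ p2, f a2 < f x) → (∀ x ∈ l, f a1 ≤ f x) →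
      p1.length < p2.length → False := by
    intro p1 a1 s1 p2 a2 s2 e1 e2 hs2 ha1 hlen
    have hmem : a1 ∈ p2 := by
      have ht : l.take p2.length = p2 := by
        rw [e2, List.take_append, List.take_of_length_le (le_refl _),
          Nat.sub_self, List.take_zero, List.append_nil]
      have ht2 : l.take p2.length = p1 ++ (a1 :: s1).take (p2.length - p1.length) := by
        rw [e1, List.take_append, List.take_of_length_le (le_of_lt hlen)]
      have hpos : p2.length - p1.length ≠ 0 := by omega
      have : a1 ∈ l.take p2.length := by
        rw [ht2]
        rcases Nat.exists_eq_succ_of_ne_zero hpos with ⟨m, hm⟩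
        rw [hm, List.take_succ_cons]
        simp
      rwa [ht] at this
    have h1 : f a1 ≤ f a2 := ha1 a2 (by rw [e2]; simp)
    have h2 : f a2 < f a1 := hs2 a1 hmem
    omega
  rcases Nat.lt_trichotomy pre1.length pre2.length with hlt | heq | hgt
  · exact absurd (key pre1 c1 suf1 pre2 c2 suf2 h1 h2 h2s h1a hlt) (by simp)
  · have := List.append_inj (h1.symm.trans h2) heq
    exact (List.cons.injEq _ _ _ _ ▸ this.2).1
  · exact absurd (key pre2 c2 suf2 pre1 c1 suf1 h2 h1 h1s h2a hgt) (by simp)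

-- the ascending set of indices and binary search ------------------------------

lemma pvAsc_perm (l : List Int) : (pvAsc l).Perm l := by
  exact PySem.List.sorted_perm _ _ _

lemma pvAsc_pairwise_lt (l : List Int) (hnd : l.Nodup) : (pvAsc l).Pairwise (· < ·) := by
  have hle : (pvAsc l).Pairwise (· ≤ ·) := by
    simpa using PySem.List.sorted_pairwise l (fun x => x)
  have hnd2 : (pvAsc l).Nodup := ((pvAsc_perm l).nodup_iff).2 hnd
  exact hle.imp₂ (fun a b hab hne => lt_of_le_of_ne hab hne) hnd2

lemma pvBisect_spec (s : List Int) (x : Int)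
    (hmono : ∀ q q' : Nat, q ≤ q' → q' < s.length →
      PySem.List.pyGetD s (q : Int) 0 ≤ PySem.List.pyGetD s (q' : Int) 0) :
    ∀ lo hi : Int, 0 ≤ lo → lo ≤ hi → hi ≤ (s.length : Int) →
      (∀ q : Nat, (q : Int) < lo → PySem.List.pyGetD s (q : Int) 0 < x) →
      (∀ q : Nat, hi ≤ (q : Int) → q < s.length → ¬ PySem.List.pyGetD s (q : Int) 0 < x) →
      lo ≤ pvBisect s x lo hi ∧ pvBisect s x lo hi ≤ hi ∧
        (∀ q : Nat, (q : Int) < pvBisect s x lo hi → PySem.List.pyGetD s (q : Int) 0 < x) ∧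
        (∀ q : Nat, pvBisect s x lo hi ≤ (q : Int) → q < s.length →
          ¬ PySem.List.pyGetD s (q : Int) 0 < x) := by
  refine pvBisect.induct s x
    (motive := fun lo hi => 0 ≤ lo → lo ≤ hi → hi ≤ (s.length : Int) →
      (∀ q : Nat, (q : Int) < lo → PySem.List.pyGetD s (q : Int) 0 < x) →
      (∀ q : Nat, hi ≤ (q : Int) → q < s.length → ¬ PySem.List.pyGetD s (q : Int) 0 < x) →
      lo ≤ pvBisect s x lo hi ∧ pvBisect s x lo hi ≤ hi ∧
        (∀ q : Nat, (q : Int) < pvBisect s x lo hi → PySem.List.pyGetD s (q : Int) 0 < x) ∧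
        (∀ q : Nat, pvBisect s x lo hi ≤ (q : Int) → q < s.length →
          ¬ PySem.List.pyGetD s (q : Int) 0 < x)) ?_ ?_ ?_
  · intro lo hi hlohi mid hcmp ih h0 _ hhi hlow hhigh
    have hmid := PySem.Int.floordiv_two_mid_bounds (lo := lo) (hi := hi) (le_of_lt hlohi)
    have hmlt : mid < hi := by
      rw [show mid = PySem.Int.floordiv (lo + hi) 2 from rfl,
        PySem.Int.floordiv_lt_iff_lt_mul (by omega)]
      omega
    have hrw : pvBisect s x lo hi = pvBisect s x (mid + 1) hi := by
      rw [pvBisect.eq_def]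
      simp only [dif_pos hlohi]
      exact if_pos hcmp
    rw [hrw]
    have hmidcast : ((mid.toNat : Nat) : Int) = mid := Int.toNat_of_nonneg (by omega)
    have hlow' : ∀ q : Nat, (q : Int) < mid + 1 → PySem.List.pyGetD s (q : Int) 0 < x := by
      intro q hq
      have hle : PySem.List.pyGetD s (q : Int) 0 ≤ PySem.List.pyGetD s (mid.toNat : Int) 0 :=
        hmono q mid.toNat (by omega) (by omega)
      rw [hmidcast] at hle
      exact lt_of_le_of_lt hle hcmp
    have := ih (by omega) (by omega) hhi hlow' hhigh
    exact ⟨by omega, this.2.1, this.2.2.1, this.2.2.2⟩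
  · intro lo hi hlohi mid hcmp ih h0 _ hhi hlow hhigh
    have hmid := PySem.Int.floordiv_two_mid_bounds (lo := lo) (hi := hi) (le_of_lt hlohi)
    have hmlt : mid < hi := by
      rw [show mid = PySem.Int.floordiv (lo + hi) 2 from rfl,
        PySem.Int.floordiv_lt_iff_lt_mul (by omega)]
      omega
    have hrw : pvBisect s x lo hi = pvBisect s x lo mid := by
      rw [pvBisect.eq_def]
      simp only [dif_pos hlohi]
      exact if_neg hcmp
    rw [hrw]
    have hmidcast : ((mid.toNat : Nat) : Int) = mid := Int.toNat_of_nonneg (by omega)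
    have hhigh' : ∀ q : Nat, mid ≤ (q : Int) → q < s.length →
        ¬ PySem.List.pyGetD s (q : Int) 0 < x := by
      intro q hq hqlen hqx
      apply hcmp
      have hle : PySem.List.pyGetD s (mid.toNat : Int) 0 ≤ PySem.List.pyGetD s (q : Int) 0 :=
        hmono mid.toNat q (by omega) hqlen
      rw [hmidcast] at hle
      exact lt_of_le_of_lt hle hqx
    have := ih h0 (by omega) (by omega) hlow hhigh'
    exact ⟨this.1, by omega, this.2.2.1, this.2.2.2⟩
  · intro lo hi hlohi h0 hle hhi hlow hhigh
    have hrw : pvBisect s x lo hi = lo := by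
      rw [pvBisect.eq_def]
      simp only [dif_neg hlohi]
    rw [hrw]
    have : lo = hi := by omega
    subst this
    exact ⟨le_refl _, le_refl _, hlow, hhigh⟩

lemma pyGetD_nat (s : List Int) (q : Nat) (hq : q < s.length) :
    PySem.List.pyGetD s (q : Int) 0 = s[q]'hq := by
  rw [PySem.List.pyGetD_natCast, List.getD_eq_getElem]

-- packaged form on the ascending list of a nodup family not containing x
lemma pvBisect_asc (x : Int) (l : List Int) (hnd : (x :: l).Nodup) :
    ∃ m : Nat, m ≤ (pvAsc l).length ∧ pvBisect (pvAsc l) x 0 ((pvAsc l).length : Int) = (m : Int) ∧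
      (∀ q : Nat, q < m → PySem.List.pyGetD (pvAsc l) (q : Int) 0 < x) ∧
      (∀ q : Nat, m ≤ q → q < (pvAsc l).length → x < PySem.List.pyGetD (pvAsc l) (q : Int) 0) := by
  have hndl : l.Nodup := (List.nodup_cons.1 hnd).2
  have hxl : x ∉ l := (List.nodup_cons.1 hnd).1
  have hpw := pvAsc_pairwise_lt l hndl
  have hget : ∀ (q : Nat) (hq : q < (pvAsc l).length),
      PySem.List.pyGetD (pvAsc l) (q : Int) 0 = (pvAsc l)[q]'hq := by
    intro q hq
    rw [PySem.List.pyGetD_natCast, List.getD_eq_getElem]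
  have hmono : ∀ q q' : Nat, q ≤ q' → q' < (pvAsc l).length →
      PySem.List.pyGetD (pvAsc l) (q : Int) 0 ≤ PySem.List.pyGetD (pvAsc l) (q' : Int) 0 := by
    intro q q' hle hlt
    rw [hget q (by omega), hget q' hlt]
    rcases Nat.eq_or_lt_of_le hle with rfl | h
    · exact le_refl _
    · exact le_of_lt ((List.pairwise_iff_getElem.1 hpw) q q' (by omega) hlt h)
  have hspec := pvBisect_spec (pvAsc l) x hmono 0 ((pvAsc l).length : Int) (le_refl 0)
    (by positivity) (le_refl _) (by intro q hq; omega) (by intro q h1 h2; exact absurd h1 (by omega))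
  obtain ⟨hge, hle2, hlow, hhigh⟩ := hspec
  refine ⟨(pvBisect (pvAsc l) x 0 ((pvAsc l).length : Int)).toNat, by omega, by omega, ?_, ?_⟩
  · intro q hq
    exact hlow q (by omega)
  · intro q hq hqlen
    have hnot := hhigh q (by omega) hqlen
    have hmem : PySem.List.pyGetD (pvAsc l) (q : Int) 0 ∈ l := by
      rw [hget q hqlen]
      exact (pvAsc_perm l).mem_iff.1 (List.getElem_mem _)
    have hne : PySem.List.pyGetD (pvAsc l) (q : Int) 0 ≠ x := fun he => hxl (he ▸ hmem)
    omega

lemma insert_bisect (x : Int) (l : List Int) (hnd : (x :: l).Nodup) :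
    PySem.List.insert (pvAsc l) (pvBisect (pvAsc l) x 0 ((pvAsc l).length : Int)) x
      = pvAsc (x :: l) := by
  obtain ⟨m, hmle, heq, hlow, hhigh⟩ := pvBisect_asc x l hnd
  rw [heq, PySem.List.insert_natCast _ m x hmle]
  refine (PySem.List.sorted_eq_of_perm_of_pairwise_lt (x :: l) _ (fun y : Int => y) ?_ ?_).symm
  · refine List.perm_middle.trans ?_
    rw [List.take_append_drop]
    exact (pvAsc_perm l).cons x
  · have hpw := pvAsc_pairwise_lt l (List.nodup_cons.1 hnd).2
    have hlow' : ∀ (q : Nat) (hq : q < (pvAsc l).length), q < m → (pvAsc l)[q]'hq < x := by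
      intro q hq hqm
      rw [← pyGetD_nat _ q hq]
      exact hlow q hqm
    have hhigh' : ∀ (q : Nat) (hq : q < (pvAsc l).length), m ≤ q → x < (pvAsc l)[q]'hq := by
      intro q hq hqm
      rw [← pyGetD_nat _ q hq]
      exact hhigh q hqm hq
    refine List.pairwise_append.2 ⟨hpw.sublist (List.take_sublist _ _), ?_, ?_⟩
    · refine List.pairwise_cons.2 ⟨?_, hpw.sublist (List.drop_sublist _ _)⟩
      intro b hb
      obtain ⟨q, hq, hbq⟩ := List.getElem_of_mem hb
      have hlen : m + q < (pvAsc l).length := by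
        have := List.length_drop (l := pvAsc l) (i := m)
        omega
      have : b = (pvAsc l)[m + q]'hlen := by
        rw [← hbq, List.getElem_drop]
      rw [this]
      exact hhigh' (m + q) hlen (by omega)
    · intro a ha b hb
      obtain ⟨q, hq, haq⟩ := List.getElem_of_mem ha
      have hqlen : q < (pvAsc l).length := by
        have := List.length_take (i := m) (l := pvAsc l)
        omega
      have hqm : q < m := by
        have := List.length_take (i := m) (l := pvAsc l)
        omega
      have hax : a < x := by
        have : a = (pvAsc l)[q]'hqlen := by
          rw [← haq, List.getElem_take]
        rw [this]
        exact hlow' q hqlen hqm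
      rcases List.mem_cons.1 hb with rfl | hb
      · exact hax
      · obtain ⟨q2, hq2, hbq2⟩ := List.getElem_of_mem hb
        have hlen2 : m + q2 < (pvAsc l).length := by
          have := List.length_drop (l := pvAsc l) (i := m)
          omega
        have : b = (pvAsc l)[m + q2]'hlen2 := by
          rw [← hbq2, List.getElem_drop]
        rw [this]
        exact lt_trans hax (hhigh' (m + q2) hlen2 (by omega))

lemma choose_firstmin (i : Int) (l : List Int) (pos : PySem.Dict Int Int) (c0 : Int)
    (hne : l ≠ []) (hnd : (i :: l).Nodup)
    (hpos : ∀ (q : Nat) (hq : q < l.length), pos.getD (l[q]) 0 = c0 + (q : Int)) :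
    ∃ pre suf, l = pre ++ (pvChoose i (pvAsc l) pos) :: suf ∧
      (∀ x ∈ pre, |i - pvChoose i (pvAsc l) pos| < |i - x|) ∧
      (∀ x ∈ l, |i - pvChoose i (pvAsc l) pos| ≤ |i - x|) := by
  have hndl : l.Nodup := (List.nodup_cons.1 hnd).2
  obtain ⟨m, hmle, heq, hlow, hhigh⟩ := pvBisect_asc i l hnd
  have hL : (pvAsc l).length = l.length := by
    rw [pvAsc, PySem.List.length_sorted]
  have hL1 : 0 < l.length := List.length_pos_of_ne_nil hne
  have hpw := pvAsc_pairwise_lt l hndl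
  have hpwi : ∀ (q q' : Nat) (hlt : q < q') (hq' : q' < (pvAsc l).length),
      (pvAsc l)[q]'(by omega) < (pvAsc l)[q']'hq' :=
    fun q q' hlt hq' => (List.pairwise_iff_getElem.1 hpw) q q' (by omega) hq' hlt
  have hlow' : ∀ (q : Nat) (hq : q < (pvAsc l).length), q < m → (pvAsc l)[q]'hq < i := by
    intro q hq hqm; rw [← pyGetD_nat _ q hq]; exact hlow q hqm
  have hhigh' : ∀ (q : Nat) (hq : q < (pvAsc l).length), m ≤ q → i < (pvAsc l)[q]'hq := by
    intro q hq hqm; rw [← pyGetD_nat _ q hq]; exact hhigh q hqm hq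
  have hmem : ∀ (q : Nat) (hq : q < (pvAsc l).length), (pvAsc l)[q]'hq ∈ l :=
    fun q hq => (pvAsc_perm l).mem_iff.1 (List.getElem_mem _)
  have hposne : ∀ a b, a ∈ l → b ∈ l → a ≠ b → pos.getD a 0 ≠ pos.getD b 0 := by
    intro a b ha hb hab
    obtain ⟨qa, hqa, rfl⟩ := List.getElem_of_mem ha
    obtain ⟨qb, hqb, rfl⟩ := List.getElem_of_mem hb
    rw [hpos qa hqa, hpos qb hqb]
    intro hcon
    have hqq : qa = qb := by omega
    subst hqq
    exact hab rfl
  have hC : ∃ (mc : Nat) (hmc : mc < (pvAsc l).length),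
      (pvAsc l)[mc]'hmc = pvChoose i (pvAsc l) pos ∧
      ∀ (q : Nat) (hq : q < (pvAsc l).length), q ≠ mc →
        (|i - (pvAsc l)[mc]'hmc| < |i - (pvAsc l)[q]'hq| ∨
         (|i - (pvAsc l)[mc]'hmc| = |i - (pvAsc l)[q]'hq| ∧
          pos.getD ((pvAsc l)[mc]'hmc) 0 < pos.getD ((pvAsc l)[q]'hq) 0)) := by
    by_cases hmL : m = (pvAsc l).length
    · -- all elements are below i; the answer is the last one
      have hm1 : 1 ≤ m := by omega
      have hc : pvChoose i (pvAsc l) pos = (pvAsc l)[m - 1]'(by omega) := by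
        simp only [pvChoose]
        rw [heq, if_pos (by exact_mod_cast congrArg (Nat.cast : Nat → Int) hmL)]
        rw [show ((m : Int) - 1) = ((m - 1 : Nat) : Int) by omega, pyGetD_nat _ _ (by omega)]
      refine ⟨m - 1, by omega, hc.symm, ?_⟩
      intro q hq hqne
      have hq1 : (pvAsc l)[q]'hq < i := hlow' q hq (by omega)
      have hq2 : (pvAsc l)[m - 1]'(by omega) < i := hlow' (m - 1) (by omega) (by omega)
      have hq3 : (pvAsc l)[q]'hq < (pvAsc l)[m - 1]'(by omega) := hpwi q (m - 1) (by omega) (by omega)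
      left
      rw [abs_of_pos (by omega), abs_of_pos (by omega)]
      omega
    · by_cases hm0 : m = 0
      · -- all elements are above i; the answer is the first one
        have hc : pvChoose i (pvAsc l) pos = (pvAsc l)[0]'(by omega) := by
          simp only [pvChoose]
          rw [heq, if_neg (by intro h; exact hmL (by exact_mod_cast h)),
            if_pos (by simp [hm0])]
          have h0 := pyGetD_nat (pvAsc l) 0 (by omega)
          simpa using h0
        refine ⟨0, by omega, hc.symm, ?_⟩
        intro q hq hqne
        have hq1 : i < (pvAsc l)[q]'hq := hhigh' q hq (by omega)
        have hq2 : i < (pvAsc l)[0]'(by omega) := hhigh' 0 (by omega) (by omega)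
        have hq3 : (pvAsc l)[0]'(by omega) < (pvAsc l)[q]'hq := hpwi 0 q (by omega) hq
        left
        rw [abs_of_neg (by omega), abs_of_neg (by omega)]
        omega
      · -- two candidates: the greatest below i and the least above
        have hmlt : m < (pvAsc l).length := by omega
        have hm1 : 1 ≤ m := by omega
        have hj : (pvAsc l)[m - 1]'(by omega) < i := hlow' (m - 1) (by omega) (by omega)
        have hr : i < (pvAsc l)[m]'hmlt := hhigh' m hmlt (by omega)
        have hjr : (pvAsc l)[m - 1]'(by omega) ≠ (pvAsc l)[m]'hmlt := by omega
        have hc : pvChoose i (pvAsc l) pos =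
            (if i - (pvAsc l)[m - 1]'(by omega) < (pvAsc l)[m]'hmlt - i ∨
                (i - (pvAsc l)[m - 1]'(by omega) = (pvAsc l)[m]'hmlt - i ∧
                 pos.getD ((pvAsc l)[m - 1]'(by omega)) 0 < pos.getD ((pvAsc l)[m]'hmlt) 0)
             then (pvAsc l)[m - 1]'(by omega) else (pvAsc l)[m]'hmlt) := by
          simp only [pvChoose]
          rw [heq, if_neg (by intro h; exact hmL (by exact_mod_cast h)),
            if_neg (by intro h; exact hm0 (by exact_mod_cast h)),
            show ((m : Int) - 1) = ((m - 1 : Nat) : Int) by omega,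
            pyGetD_nat _ _ (by omega), pyGetD_nat _ _ hmlt]
        by_cases hcond : i - (pvAsc l)[m - 1]'(by omega) < (pvAsc l)[m]'hmlt - i ∨
            (i - (pvAsc l)[m - 1]'(by omega) = (pvAsc l)[m]'hmlt - i ∧
             pos.getD ((pvAsc l)[m - 1]'(by omega)) 0 < pos.getD ((pvAsc l)[m]'hmlt) 0)
        · -- the lower neighbour wins
          have hc' : pvChoose i (pvAsc l) pos = (pvAsc l)[m - 1]'(by omega) := by
            rw [hc, if_pos hcond]
          have hler : i - (pvAsc l)[m - 1]'(by omega) ≤ (pvAsc l)[m]'hmlt - i := by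
            rcases hcond with h | ⟨h, _⟩ <;> omega
          refine ⟨m - 1, by omega, hc'.symm, ?_⟩
          intro q hq hqne
          rw [abs_of_pos (by omega)]
          rcases Nat.lt_trichotomy q (m - 1) with hqlt | hqeq | hqgt
          · have h3 : (pvAsc l)[q]'hq < (pvAsc l)[m - 1]'(by omega) := hpwi q (m - 1) hqlt (by omega)
            left
            rw [abs_of_pos (by omega)]
            omega
          · exact absurd hqeq hqne
          · have hqm : m ≤ q := by omega
            have h4 : i < (pvAsc l)[q]'hq := hhigh' q hq hqm
            rw [abs_of_neg (by omega)]
            rcases Nat.eq_or_lt_of_le hqm with rfl | hqgt2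
            · -- q = m : the upper neighbour
              rcases hcond with h | ⟨h, hp⟩
              · left; omega
              · right
                exact ⟨by omega, hp⟩
            · have h5 : (pvAsc l)[m]'hmlt < (pvAsc l)[q]'hq := hpwi m q hqgt2 hq
              left
              omega
        · -- the upper neighbour wins
          have hc' : pvChoose i (pvAsc l) pos = (pvAsc l)[m]'hmlt := by
            rw [hc, if_neg hcond]
          push Not at hcond
          obtain ⟨hc1, hc2⟩ := hcond
          refine ⟨m, hmlt, hc'.symm, ?_⟩
          intro q hq hqne
          rw [abs_of_neg (by omega)]
          rcases Nat.lt_trichotomy q m with hqlt | hqeq | hqgt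
          · have h3 : (pvAsc l)[q]'hq < i := hlow' q hq hqlt
            rw [abs_of_pos (by omega)]
            rcases Nat.eq_or_lt_of_le (show q ≤ m - 1 by omega) with heqq | hqlt2
            · -- q = m - 1 : the lower neighbour, a genuine tie is broken by pos
              subst heqq
              rcases lt_or_eq_of_le hc1 with hlt2 | heq2
              · left; omega
              · right
                refine ⟨by omega, ?_⟩
                have hne2 : (pvAsc l)[m]'hmlt ≠ (pvAsc l)[m - 1]'(by omega) := by omega
                have hc2' := hc2 (by omega)
                have hnepos := hposne _ _ (hmem m hmlt) (hmem (m - 1) (by omega)) hne2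
                omega
            · have h5 : (pvAsc l)[q]'hq < (pvAsc l)[m - 1]'(by omega) := hpwi q (m - 1) hqlt2 (by omega)
              left
              omega
          · exact absurd hqeq hqne
          · have h4 : (pvAsc l)[m]'hmlt < (pvAsc l)[q]'hq := hpwi m q hqgt hq
            left
            rw [abs_of_neg (by omega)]
            omega
  obtain ⟨mc, hmc, hceq, hprop⟩ := hC
  have hcl : pvChoose i (pvAsc l) pos ∈ l := hceq ▸ hmem mc hmc
  obtain ⟨nc, hnc, hncl⟩ := List.getElem_of_mem hcl
  refine ⟨l.take nc, l.drop (nc + 1), ?_, ?_, ?_⟩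
  · conv_lhs => rw [← List.take_append_drop nc l]
    rw [List.drop_eq_getElem_cons hnc, hncl]
  · intro x hx
    obtain ⟨q, hq, hxq⟩ := List.getElem_of_mem hx
    have hlt : (List.take nc l).length = min nc l.length := List.length_take
    have hq2 : q < l.length := by omega
    have hqnc : q < nc := by omega
    have hxl : x = l[q]'hq2 := by rw [← hxq, List.getElem_take]
    have hxc : x ≠ pvChoose i (pvAsc l) pos := by
      rw [hxl, ← hncl]
      intro hcon
      have := (List.Nodup.getElem_inj_iff hndl).1 hcon
      omega
    -- find x in the sorted list
    have hxs : x ∈ pvAsc l := (pvAsc_perm l).mem_iff.2 (hxl ▸ List.getElem_mem hq2)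
    obtain ⟨qs, hqs, hqsx⟩ := List.getElem_of_mem hxs
    have hqsne : qs ≠ mc := by
      intro hcon
      subst hcon
      exact hxc (by rw [← hqsx, hceq])
    rcases hprop qs hqs hqsne with hstrict | ⟨htie, hpos2⟩
    · rw [hceq, hqsx] at hstrict
      exact hstrict
    · -- a tie is impossible: x is earlier in l than the chosen one
      exfalso
      rw [hceq, hqsx] at hpos2
      rw [hxl] at hpos2
      rw [← hncl] at hpos2
      rw [hpos nc hnc, hpos q hq2] at hpos2
      omega
  · intro x hx
    by_cases hxc : x = pvChoose i (pvAsc l) pos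
    · rw [hxc]
    · have hxs : x ∈ pvAsc l := (pvAsc_perm l).mem_iff.2 hx
      obtain ⟨qs, hqs, hqsx⟩ := List.getElem_of_mem hxs
      have hqsne : qs ≠ mc := by
        intro hcon
        subst hcon
        exact hxc (by rw [← hqsx, hceq])
      rcases hprop qs hqs hqsne with hstrict | ⟨htie, _⟩
      · rw [hceq, hqsx] at hstrict
        exact le_of_lt hstrict
      · rw [hceq, hqsx] at htie
        exact le_of_eq htie

-- the position dictionary ------------------------------------------------------

lemma pvPos_get? (arr : List Int) (q : Nat) (hq : q < arr.length) :
    (pvPos arr).get? ((pvOrder arr)[q]'(by rw [pvOrder_length]; exact hq)) = some (q : Int) := by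
  have hq' : q < (pvOrder arr).length := by rw [pvOrder_length]; exact hq
  have hnodup : ((PySem.List.enumerate (pvOrder arr)).map (fun pi => pi.2)).Nodup := by
    rw [PySem.List.map_snd_enumerate]
    exact pvOrder_nodup arr
  have hitems : (pvPos arr).items
      = (PySem.List.enumerate (pvOrder arr)).map (fun pi => (pi.2, pi.1)) := by
    have h := PySem.Dict.items_foldl_insert_fresh (PySem.List.enumerate (pvOrder arr))
      (fun pi => pi.2) (fun pi => pi.1) PySem.Dict.empty (by intro a _; simp) hnodup
    simpa [pvPos] using h
  apply PySem.Dict.get?_of_mem_items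
  · rw [hitems]
    refine List.mem_map.2 ⟨(0 + (q : Int), (pvOrder arr)[q]'hq'), ?_, by simp⟩
    exact (PySem.List.mem_enumerate_iff _ 0 _).2 ⟨q, hq', rfl⟩
  · have hkeys : (pvPos arr).keys = pvOrder arr := by
      simp only [PySem.Dict.keys, hitems, List.map_map]
      have : ((fun p : Int × Int => p.1) ∘ fun pi : Int × Int => (pi.2, pi.1))
          = fun pi : Int × Int => pi.2 := rfl
      rw [this, PySem.List.map_snd_enumerate]
    rw [hkeys]
    exact pvOrder_nodup arr

-- normal forms of the two ports -------------------------------------------------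

lemma A_eq (arr : List Int) :
    get_mapping_indices arr
      = (List.range (arr.length - 1)).map (fun (k : Nat) => (pvGd arr (k : Int), pvBestA arr k)) := by
  simp only [get_mapping_indices, sorted_tuples_eq arr]
  rw [PySem.List.slice_to_neg_one, ← List.map_dropLast]
  have hMLlen : ((pvOrder arr).dropLast.map (fun i => (pvKey arr i, i))).length
      = arr.length - 1 := by
    rw [List.length_map, List.length_dropLast, pvOrder_length]
  -- rewrite the outer loop body: each iteration appends one fresh key
  have hbody : ∀ (nl : PySem.Dict Int Int),
      ∀ ki ∈ PySem.List.enumerate ((pvOrder arr).dropLast.map (fun i => (pvKey arr i, i))),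
      (List.foldl
          (fun (st : Int × PySem.Dict Int Int) m =>
            if |ki.2.2 - (PySem.List.pyGetD ((pvOrder arr).map (fun i => (pvKey arr i, i))) m (0, 0)).2| < st.1 then
              (|ki.2.2 - (PySem.List.pyGetD ((pvOrder arr).map (fun i => (pvKey arr i, i))) m (0, 0)).2|,
                st.2.insert ki.2.2
                  (PySem.List.pyGetD ((pvOrder arr).map (fun i => (pvKey arr i, i))) m (0, 0)).2)
            else st)
          ((arr.length : Int), nl)
          (PySem.List.pyRange (ki.1 + 1) (((pvOrder arr).map (fun i => (pvKey arr i, i))).length : Int))).2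
        = nl.insert ki.2.2
            ((pvScan ki.2.2 ((pvOrder arr).drop (ki.1.toNat + 1)) ((arr.length : Int), 0)).2) := by
    intro nl ki hki
    obtain ⟨k, hk, hkieq⟩ := (PySem.List.mem_enumerate_iff _ 0 _).1 hki
    have hkn : k < arr.length - 1 := by rw [hMLlen] at hk; exact hk
    subst hkieq
    have hkord : k < (pvOrder arr).length := by rw [pvOrder_length]; omega
    simp only [List.getElem_map, List.getElem_dropLast]
    have hcast : (0 : Int) + (k : Int) + 1 = ((k + 1 : Nat) : Int) := by push_cast; ring
    have hpyr := PySem.List.foldl_pyRange_pyGetD' ((pvOrder arr).map (fun i => (pvKey arr i, i)))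
      ((0 : Int), (0 : Int))
      (fun (st : Int × PySem.Dict Int Int) (t : Int × Int) =>
        if |(pvOrder arr)[k]'hkord - t.2| < st.1 then
          (|(pvOrder arr)[k]'hkord - t.2|, st.2.insert ((pvOrder arr)[k]'hkord) t.2)
        else st)
      ((arr.length : Int), nl) (a := ((k + 1 : Nat) : Int)) (by positivity)
    simp only [] at hpyr
    rw [hcast, hpyr, Int.toNat_natCast]
    rw [← List.map_drop]
    have hdropne : (pvOrder arr).drop (k + 1) ≠ [] := by
      apply List.ne_nil_of_length_pos
      rw [List.length_drop, pvOrder_length]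
      omega
    have himp : ∀ t ∈ ((pvOrder arr).drop (k + 1)).map (fun i => (pvKey arr i, i)),
        |(pvOrder arr)[k]'hkord - t.2| < (arr.length : Int) := by
      intro t ht
      obtain ⟨x, hx, rfl⟩ := List.mem_map.1 ht
      have hxb := pvOrder_mem_bounds arr (List.mem_of_mem_drop hx)
      have hib := pvOrder_mem_bounds arr (List.getElem_mem hkord)
      rcases abs_cases ((pvOrder arr)[k]'hkord - x) with ⟨he, _⟩ | ⟨he, _⟩ <;>
        simp only [] <;> omega
    rw [scanDictStart ((pvOrder arr)[k]'hkord) _ _ nl (by simpa using hdropne) himp]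
    rw [List.map_map]
    have hid : ((fun (t : Int × Int) => t.2) ∘ fun i => (pvKey arr i, i)) = fun (i : Int) => i := rfl
    rw [hid, List.map_id']
    have hk1 : ((0 : Int) + (k : Int)).toNat + 1 = k + 1 := by simp
    rw [hk1]
  rw [PySem.List.foldl_congr_mem _ _
    (fun (nl : PySem.Dict Int Int) ki => nl.insert ki.2.2
      ((pvScan ki.2.2 ((pvOrder arr).drop (ki.1.toNat + 1)) ((arr.length : Int), 0)).2)) _ hbody]
  have hnodup : ((PySem.List.enumerate ((pvOrder arr).dropLast.map (fun i => (pvKey arr i, i)))).map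
      (fun ki => ki.2.2)).Nodup := by
    rw [show (fun (ki : Int × (Int × Int)) => ki.2.2)
        = (fun (p : Int × Int) => p.2) ∘ (fun (ki : Int × (Int × Int)) => ki.2) from rfl,
      ← List.map_map, PySem.List.map_snd_enumerate, List.map_map]
    rw [show ((fun (t : Int × Int) => t.2) ∘ fun i => (pvKey arr i, i)) = fun (i : Int) => i from rfl,
      List.map_id']
    exact (List.dropLast_sublist _).nodup (pvOrder_nodup arr)
  have hins := PySem.Dict.items_foldl_insert_fresh
    (PySem.List.enumerate ((pvOrder arr).dropLast.map (fun i => (pvKey arr i, i))))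
    (fun ki => ki.2.2)
    (fun ki => (pvScan ki.2.2 ((pvOrder arr).drop (ki.1.toNat + 1)) ((arr.length : Int), 0)).2)
    PySem.Dict.empty (fun a _ => by simp) hnodup
  simp only [] at hins
  rw [hins]
  rw [show (PySem.Dict.empty : PySem.Dict Int Int).items = [] from rfl, List.nil_append]
  rw [PySem.List.enumerate_eq_map_pyRange _ ((0 : Int), (0 : Int)), List.map_map]
  have hlen2 : PySem.List.len ((pvOrder arr).dropLast.map (fun i => (pvKey arr i, i)))
      = ((arr.length - 1 : Nat) : Int) := by
    rw [PySem.List.len_eq, hMLlen]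
  rw [hlen2, PySem.List.pyRange_zero_nat, List.map_map]
  apply List.map_congr_left
  intro k hk
  rw [List.mem_range] at hk
  simp only [Function.comp]
  have hkl : k < ((pvOrder arr).dropLast.map (fun i => (pvKey arr i, i))).length := by
    rw [hMLlen]; exact hk
  have hget : PySem.List.pyGetD ((pvOrder arr).dropLast.map (fun i => (pvKey arr i, i))) (k : Int)
      ((0 : Int), (0 : Int))
      = (pvKey arr ((pvOrder arr)[k]'(by rw [pvOrder_length]; omega)),
         (pvOrder arr)[k]'(by rw [pvOrder_length]; omega)) := by
    rw [PySem.List.pyGetD_natCast, List.getD_eq_getElem _ _ hkl]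
    simp only [List.getElem_map]
    rw [List.getElem_dropLast]
  rw [hget]
  simp only []
  rw [Int.toNat_natCast]
  rw [← pvGd_eq_getElem arr k (by omega)]
  rfl

lemma B_eq (arr : List Int) :
    get_mapping_indices_alt arr
      = (List.range (arr.length - 1)).map (fun (k : Nat) => (pvGd arr (k : Int), pvBestB arr k)) := by
  have h0 : get_mapping_indices_alt arr =
      ((PySem.List.slice (pvOrder arr) none (some (-1))).foldl
        (fun d i => d.insert i ((pvLoop arr).2.getD i 0)) PySem.Dict.empty).items := rfl
  rw [h0]
  -- the sweep invariant
  have hInv : ∀ t, t ≤ arr.length → ∃ r : PySem.Dict Int Int,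
      ((PySem.List.pyRange ((arr.length : Int) - 1) (-1) (-1)).take t).foldl (pvBody arr)
          ([], PySem.Dict.empty)
        = (pvAsc ((pvOrder arr).drop (arr.length - t)), r)
      ∧ ∀ (q : Nat), arr.length - t ≤ q → q + 1 < arr.length →
          r.get? (pvGd arr (q : Int)) = some (pvBestB arr q) := by
    intro t
    induction t with
    | zero =>
        intro _
        refine ⟨PySem.Dict.empty, ?_, ?_⟩
        · rw [List.take_zero, List.foldl_nil, Nat.sub_zero,
            List.drop_eq_nil_of_le (le_of_eq (pvOrder_length arr))]
          rfl
        · intro q hq1 hq2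
          omega
    | succ t ih =>
        intro ht
        obtain ⟨r, hstate, hres⟩ := ih (by omega)
        have htake : ((PySem.List.pyRange ((arr.length : Int) - 1) (-1) (-1)).take (t + 1))
            = ((PySem.List.pyRange ((arr.length : Int) - 1) (-1) (-1)).take t)
              ++ [((arr.length : Int) - 1 - (t : Int))] := by
          rw [List.take_add_one, PySem.List.pyRange_neg_one]
          have hlen : ((arr.length : Int) - 1 - -1).toNat = arr.length := by omega
          rw [hlen, List.getElem?_map, List.getElem?_range (by omega)]
          rfl
        rw [htake, List.foldl_append, List.foldl_cons, List.foldl_nil, hstate]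
        have hidx : ((arr.length : Int) - 1 - (t : Int)) = ((arr.length - 1 - t : Nat) : Int) := by
          omega
        have hp : arr.length - 1 - t < (pvOrder arr).length := by rw [pvOrder_length]; omega
        have hi : PySem.List.pyGetD (pvOrder arr) ((arr.length : Int) - 1 - (t : Int)) 0
            = pvGd arr ((arr.length - 1 - t : Nat) : Int) := by
          rw [hidx, pvGd]
        have hlendrop : ((pvOrder arr).drop (arr.length - t)).length = t := by
          rw [List.length_drop, pvOrder_length]
          omega
        rcases Nat.eq_zero_or_pos t with rfl | htpos
        · -- first iteration: the suffix is empty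
          have hsufnil : pvAsc ((pvOrder arr).drop (arr.length - 0)) = [] := by
            rw [Nat.sub_zero, List.drop_eq_nil_of_le (le_of_eq (pvOrder_length arr))]
            rfl
          refine ⟨r, ?_, ?_⟩
          · rw [pvBody, hsufnil]
            simp only [ne_eq, not_true_eq_false, List.nil_append]
            rw [hi]
            have hdrop1 : (pvOrder arr).drop (arr.length - 1)
                = [(pvOrder arr)[arr.length - 1 - 0]'hp] := by
              rw [List.drop_eq_getElem_cons (by rw [pvOrder_length]; omega)]
              have : (pvOrder arr).drop (arr.length - 1 + 1) = [] := by
                apply List.drop_eq_nil_of_le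
                rw [pvOrder_length]
                omega
              rw [this]
              rfl
            rw [hdrop1]
            have hasc1 : pvAsc [(pvOrder arr)[arr.length - 1 - 0]'hp]
                = [(pvOrder arr)[arr.length - 1 - 0]'hp] :=
              PySem.List.sorted_eq_of_perm_of_pairwise_lt _ _ (fun y : Int => y)
                (List.Perm.refl _) (by simp)
            rw [hasc1, pvGd_eq_getElem arr (arr.length - 1 - 0) (by omega)]
            simp
          · intro q hq1 hq2
            omega
        · -- later iterations: query the two neighbours, then insert
          have hsufne : pvAsc ((pvOrder arr).drop (arr.length - t)) ≠ [] := by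
            apply List.ne_nil_of_length_pos
            rw [pvAsc, PySem.List.length_sorted, hlendrop]
            omega
          have hconsdrop : (pvOrder arr).drop (arr.length - (t + 1))
              = (pvOrder arr)[arr.length - 1 - t]'hp :: (pvOrder arr).drop (arr.length - t) := by
            rw [show arr.length - (t + 1) = arr.length - 1 - t by omega,
              List.drop_eq_getElem_cons hp,
              show arr.length - 1 - t + 1 = arr.length - t by omega]
          have hndcons : ((pvOrder arr)[arr.length - 1 - t]'hp
              :: (pvOrder arr).drop (arr.length - t)).Nodup := by
            rw [← hconsdrop]
            exact (List.drop_sublist _ _).nodup (pvOrder_nodup arr)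
          refine ⟨r.insert (pvGd arr ((arr.length - 1 - t : Nat) : Int))
            (pvBestB arr (arr.length - 1 - t)), ?_, ?_⟩
          · rw [pvBody]
            simp only [if_pos hsufne, hi]
            rw [Prod.mk.injEq]
            constructor
            · -- the new suffix
              rw [pvGd_eq_getElem arr (arr.length - 1 - t) (by omega)]
              rw [insert_bisect _ _ hndcons, ← hconsdrop]
            · -- the new result dictionary
              rw [show pvBestB arr (arr.length - 1 - t)
                  = pvChoose (pvGd arr ((arr.length - 1 - t : Nat) : Int))
                      (pvAsc ((pvOrder arr).drop (arr.length - 1 - t + 1))) (pvPos arr) from rfl,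
                show arr.length - 1 - t + 1 = arr.length - t by omega]
          · intro q hq1 hq2
            rcases Nat.eq_or_lt_of_le hq1 with heqq | hlt
            · have hqe : q = arr.length - 1 - t := by omega
              subst hqe
              rw [PySem.Dict.get?_insert, if_pos rfl]
            · rw [PySem.Dict.get?_insert, if_neg, hres q (by omega) hq2]
              intro hcon
              have h1 := pvGd_eq_getElem arr q (by omega)
              have h2 := pvGd_eq_getElem arr (arr.length - 1 - t) (by omega)
              rw [h1, h2] at hcon
              have := (List.Nodup.getElem_inj_iff (pvOrder_nodup arr)).1 hcon
              omega
  obtain ⟨r, hstate, hres⟩ := hInv arr.length (le_refl _)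
  have htakeall : ((PySem.List.pyRange ((arr.length : Int) - 1) (-1) (-1)).take arr.length)
      = PySem.List.pyRange ((arr.length : Int) - 1) (-1) (-1) := by
    apply List.take_of_length_le
    rw [PySem.List.length_pyRange_neg_one]
    omega
  have hloop : (pvLoop arr).2 = r := by
    rw [pvLoop, ← htakeall, hstate]
  rw [hloop, PySem.List.slice_to_neg_one]
  -- the final dictionary comprehension over order[:-1]
  have hnodup2 : ((pvOrder arr).dropLast.map (fun i => i)).Nodup := by
    rw [List.map_id']
    exact (List.dropLast_sublist _).nodup (pvOrder_nodup arr)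
  have hins := PySem.Dict.items_foldl_insert_fresh (pvOrder arr).dropLast
    (fun i => i) (fun i => r.getD i 0) PySem.Dict.empty (fun a _ => by simp) hnodup2
  simp only [] at hins
  rw [hins, show (PySem.Dict.empty : PySem.Dict Int Int).items = [] from rfl, List.nil_append]
  -- convert to the range normal form
  have hdl : (pvOrder arr).dropLast
      = (List.range (arr.length - 1)).map (fun (k : Nat) => pvGd arr (k : Int)) := by
    apply List.ext_getElem
    · rw [List.length_dropLast, pvOrder_length, List.length_map, List.length_range]
    · intro q h1 h2
      rw [List.getElem_dropLast, List.getElem_map, List.getElem_range,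
        ← pvGd_eq_getElem arr q (by
          rw [List.length_dropLast, pvOrder_length] at h1
          omega)]
  rw [hdl, List.map_map]
  apply List.map_congr_left
  intro k hk
  rw [List.mem_range] at hk
  simp only [Function.comp]
  rw [PySem.Dict.getD_of_get?_eq_some _ _ (hres k (by omega) (by omega))]

lemma best_eq (arr : List Int) (k : Nat) (hk : k + 1 < arr.length) :
    pvBestA arr k = pvBestB arr k := by
  have hkl : k < (pvOrder arr).length := by rw [pvOrder_length]; omega
  have hdropk : (pvOrder arr).drop k = pvGd arr (k : Int) :: (pvOrder arr).drop (k + 1) := by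
    rw [List.drop_eq_getElem_cons hkl, pvGd_eq_getElem arr k (by omega)]
  have hnd : (pvGd arr (k : Int) :: (pvOrder arr).drop (k + 1)).Nodup := by
    rw [← hdropk]
    exact (List.drop_sublist k (pvOrder arr)).nodup (pvOrder_nodup arr)
  have hne : (pvOrder arr).drop (k + 1) ≠ [] := by
    apply List.ne_nil_of_length_pos
    rw [List.length_drop, pvOrder_length]
    omega
  have hposh : ∀ (q : Nat) (hq : q < ((pvOrder arr).drop (k + 1)).length),
      (pvPos arr).getD (((pvOrder arr).drop (k + 1))[q]'hq) 0 = ((k : Int) + 1) + (q : Int) := by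
    intro q hq
    have hq2 : k + 1 + q < arr.length := by
      rw [List.length_drop, pvOrder_length] at hq
      omega
    have hgd : ((pvOrder arr).drop (k + 1))[q]'hq
        = (pvOrder arr)[k + 1 + q]'(by rw [pvOrder_length]; omega) := by
      rw [List.getElem_drop]
    rw [hgd, PySem.Dict.getD_of_get?_eq_some _ _ (pvPos_get? arr (k + 1 + q) hq2)]
    push_cast
    ring
  obtain ⟨pre2, suf2, hsplit2, hpre2, hall2⟩ := choose_firstmin (pvGd arr (k : Int))
    ((pvOrder arr).drop (k + 1)) (pvPos arr) ((k : Int) + 1) hne hnd hposh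
  obtain ⟨h1, h2, h3⟩ := scan_spec (pvGd arr (k : Int)) ((pvOrder arr).drop (k + 1))
    ((arr.length : Int)) 0
  have hbound : ∀ x ∈ (pvOrder arr).drop (k + 1), |pvGd arr (k : Int) - x| < (arr.length : Int) := by
    intro x hx
    have hxmem : x ∈ pvOrder arr := List.mem_of_mem_drop hx
    have hib := pvOrder_mem_bounds arr (show pvGd arr (k : Int) ∈ pvOrder arr by
      rw [pvGd_eq_getElem arr k (by omega)]
      exact List.getElem_mem _)
    have hxb := pvOrder_mem_bounds arr hxmem
    rcases abs_cases (pvGd arr (k : Int) - x) with ⟨he, _⟩ | ⟨he, _⟩ <;> omega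
  rcases h3 with heq3 | ⟨hlt3, pre1, suf1, hsplit1, habs1, hpre1⟩
  · exfalso
    obtain ⟨j, hj⟩ := List.exists_mem_of_ne_nil _ hne
    have hj2 := h2 j hj
    rw [heq3] at hj2
    have := hbound j hj
    omega
  · unfold pvBestA pvBestB
    exact firstmin_unique (fun x => |pvGd arr (k : Int) - x|) _ hsplit1
      (fun x hx => by simp only []; rw [habs1]; exact hpre1 x hx)
      (fun x hx => by simp only []; rw [habs1]; exact h2 x hx)
      hsplit2
      (fun x hx => by simp only []; exact hpre2 x hx)
      (fun x hx => by simp only []; exact hall2 x hx)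

-- ===== VERDICT (by name: the statement is the Claim_ definition above) =====
theorem get_mapping_indices_spec : Claim_equal_get_mapping_indices := by
  intro arr _
  show get_mapping_indices arr = get_mapping_indices_alt arr
  rw [A_eq, B_eq]
  refine List.map_congr_left ?_
  intro k hk
  rw [List.mem_range] at hk
  rw [best_eq arr k (by omega)]
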